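-- pv_equiv track=rewrite | github.com/Morphogens/ProsePainter | server/test.py | get_clip_model_name_list_combination
-- ===== SOURCE A (Python) =====
-- import itertools
--
-- def get_clip_model_name_list_combination(
--     clip_model_name_list,
--     max_combination_num=None,
-- ):
--     if max_combination_num is None:
--         max_combination_num = len(clip_model_name_list)
--
--     clip_model_name_lists = []
--     for binary_mask in itertools.product(range(2),
--                                          repeat=len(clip_model_name_list)):
--         if 1 not in binary_mask or sum(binary_mask) > max_combination_num:
--             continue
--
--         clip_model_name_lists.append(
--             list(itertools.compress(clip_model_name_list, binary_mask)))
--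
--     return clip_model_name_lists
-- ===== SOURCE B (Python) =====
-- def _subsets(names):
--     # all subsets of names, in binary-counting order (first element = MSB)
--     if not names:
--         return [[]]
--     rest = _subsets(names[1:])
--     return rest + [[names[0]] + s for s in rest]
--
-- def get_clip_model_name_list_combination(
--     clip_model_name_list,
--     max_combination_num=None,
-- ):
--     if max_combination_num is None:
--         max_combination_num = len(clip_model_name_list)
--     return [s for s in _subsets(list(clip_model_name_list))
--             if s and len(s) <= max_combination_num]
-- ===== Notes on version B (the rewrite author's own statement) =====
-- stated objective: simpler
-- what changed: B replaces A's enumeration of all 2^n bitmasks (with a membership test, sum and itertools.compress per mask) by a direct recursive powerset construction (subsets of the tail, then the same subsets with the head prepended), followed by one filter on emptiness and length.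
import Mathlib
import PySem

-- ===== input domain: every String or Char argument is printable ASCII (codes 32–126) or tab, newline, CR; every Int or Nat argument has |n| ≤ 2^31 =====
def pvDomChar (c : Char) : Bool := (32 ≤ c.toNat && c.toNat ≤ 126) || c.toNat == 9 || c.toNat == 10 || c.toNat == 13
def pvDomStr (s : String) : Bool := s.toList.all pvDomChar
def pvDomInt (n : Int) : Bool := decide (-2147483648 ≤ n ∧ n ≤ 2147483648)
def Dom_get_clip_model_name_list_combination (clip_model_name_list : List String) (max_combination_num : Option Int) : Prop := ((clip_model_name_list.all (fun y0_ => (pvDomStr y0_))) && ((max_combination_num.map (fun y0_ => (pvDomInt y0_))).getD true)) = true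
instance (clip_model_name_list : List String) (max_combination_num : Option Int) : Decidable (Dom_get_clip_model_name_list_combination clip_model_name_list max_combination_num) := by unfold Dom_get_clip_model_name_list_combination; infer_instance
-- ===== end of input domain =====

-- B builds the powerset by a direct recursion (tail's subsets, then head prepended to each)
-- and filters once, instead of A's enumeration of all 2^n bitmasks with compress; same cost, simpler.

-- ===== PORT A =====
-- itertools.product(range(2), repeat=n): first coordinate varies slowest
def pvMasksA (n : Nat) : List (List Nat) :=
  match n with
  | 0 => [[]]
  | n + 1 => [0, 1].flatMap (fun b => (pvMasksA n).map (fun r => b :: r))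

-- list(itertools.compress(xs, mask)) for a 0/1 mask
def pvCompress (xs : List String) (mask : List Nat) : List String :=
  (xs.zip mask).filterMap (fun p => if p.2 == 1 then some p.1 else none)

def get_clip_model_name_list_combination (clip_model_name_list : List String) (max_combination_num : Option Int) : List (List String) :=
  let m : Int := match max_combination_num with
    | none => (clip_model_name_list.length : Int)
    | some m => m
  (pvMasksA clip_model_name_list.length).foldl (fun acc mask =>
    if !mask.contains 1 || ((mask.sum : Int) > m) then acc
    else acc ++ [pvCompress clip_model_name_list mask]) []

-- ===== PORT B =====
def pvSubsetsB (names : List String) : List (List String) :=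
  match names with
  | [] => [[]]
  | x :: rest =>
    let r := pvSubsetsB rest
    r ++ r.map (fun s => x :: s)

def get_clip_model_name_list_combination_alt (clip_model_name_list : List String) (max_combination_num : Option Int) : List (List String) :=
  let m : Int := match max_combination_num with
    | none => (clip_model_name_list.length : Int)
    | some m => m
  (pvSubsetsB clip_model_name_list).filter (fun s => !s.isEmpty && ((s.length : Int) ≤ m))

-- ===== PRECONDITION & SPEC =====
def Spec_get_clip_model_name_list_combination (clip_model_name_list : List String) (max_combination_num : Option Int) (out : List (List String)) : Prop := out = get_clip_model_name_list_combination_alt clip_model_name_list max_combination_num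
instance (clip_model_name_list : List String) (max_combination_num : Option Int) (out : List (List String)) : Decidable (Spec_get_clip_model_name_list_combination clip_model_name_list max_combination_num out) := by unfold Spec_get_clip_model_name_list_combination; infer_instance

-- ===== CLAIM (what is proved, stated in full; the proofs are below) =====
def Claim_equal_get_clip_model_name_list_combination : Prop := ∀ (clip_model_name_list : List String) (max_combination_num : Option Int), Dom_get_clip_model_name_list_combination clip_model_name_list max_combination_num → Spec_get_clip_model_name_list_combination clip_model_name_list max_combination_num (get_clip_model_name_list_combination clip_model_name_list max_combination_num)

-- ===== LEMMAS AND PROOFS =====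

-- compressing every mask of length n = the powerset built by B's recursion
theorem map_compress_masks (xs : List String) :
    (pvMasksA xs.length).map (pvCompress xs) = pvSubsetsB xs := by
  induction xs with
  | nil => simp [pvMasksA, pvSubsetsB, pvCompress]
  | cons x rest ih =>
    simp only [List.length_cons, pvMasksA, pvSubsetsB, List.flatMap_cons,
      List.flatMap_nil, List.append_nil, List.map_append, List.map_map]
    have h0 : (pvMasksA rest.length).map (pvCompress (x :: rest) ∘ fun r => (0:Nat) :: r)
        = (pvMasksA rest.length).map (pvCompress rest) := by
      apply List.map_congr_left; intro r _; simp [pvCompress]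
    have h1 : (pvMasksA rest.length).map (pvCompress (x :: rest) ∘ fun r => (1:Nat) :: r)
        = ((pvMasksA rest.length).map (pvCompress rest)).map (fun s => x :: s) := by
      rw [List.map_map]; apply List.map_congr_left; intro r _
      simp [pvCompress, Function.comp]
    rw [h0, h1, ih]

theorem pv_bool_aux (a m : Int) : (!decide (a + 1 > m)) = decide (a + 1 ≤ m) := by
  by_cases h : a + 1 ≤ m
  · have h2 : ¬ (a + 1 > m) := by omega
    simp [h, h2]
  · have h2 : a + 1 > m := by omega
    simp [h, h2]

-- on a 0/1 mask matching xs's length, compress keeps sum-many elements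
theorem compress_length (ys : List String) :
    ∀ rr ∈ pvMasksA ys.length, (pvCompress ys rr).length = rr.sum := by
  induction ys with
  | nil => intro rr h; simp [pvMasksA] at h; subst h; simp [pvCompress]
  | cons y t iht =>
    intro rr h
    simp only [List.length_cons, pvMasksA, List.flatMap_cons, List.flatMap_nil,
      List.append_nil, List.mem_append, List.mem_map] at h
    rcases h with ⟨q, hq, rfl⟩ | ⟨q, hq, rfl⟩
    · simpa [pvCompress] using iht q hq
    · have := iht q hq
      simp [pvCompress] at this ⊢
      omega

-- on masks of length = xs.length, A's keep-test equals B's filter test on the compressed subset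
theorem keep_eq (xs : List String) (m : Int) :
    ∀ mask ∈ pvMasksA xs.length,
      (!(!mask.contains 1 || ((mask.sum : Int) > m))) =
      (!(pvCompress xs mask).isEmpty && (((pvCompress xs mask).length : Int) ≤ m)) := by
  induction xs with
  | nil =>
    intro mask hm
    simp [pvMasksA] at hm
    subst hm
    simp [pvCompress]
  | cons x rest ih =>
    intro mask hm
    simp only [List.length_cons, pvMasksA, List.flatMap_cons, List.flatMap_nil,
      List.append_nil, List.mem_append, List.mem_map] at hm
    rcases hm with ⟨r, hr, rfl⟩ | ⟨r, hr, rfl⟩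
    · simpa [pvCompress] using ih r hr
    · have hc : pvCompress (x :: rest) (1 :: r) = x :: pvCompress rest r := by
        simp [pvCompress]
      have hlen := compress_length rest r hr
      simp only [hc, List.contains_cons, List.isEmpty_cons, List.length_cons, hlen,
        List.sum_cons, beq_self_eq_true, Bool.true_or, Bool.not_true, Bool.false_or,
        Bool.not_false, Bool.true_and]
      have e1 : ((1 + r.sum : Nat) : Int) = (r.sum : Int) + 1 := by push_cast; ring
      have e2 : ((r.sum + 1 : Nat) : Int) = (r.sum : Int) + 1 := by push_cast; ring
      simp only [e1, e2]
      exact pv_bool_aux (r.sum : Int) m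

-- the core equality, with the effective bound m already resolved
theorem main_eq (xs : List String) (m : Int) :
    (pvMasksA xs.length).foldl (fun acc mask =>
      if !mask.contains 1 || ((mask.sum : Int) > m) then acc
      else acc ++ [pvCompress xs mask]) [] =
    (pvSubsetsB xs).filter (fun s => !s.isEmpty && ((s.length : Int) ≤ m)) := by
  have hfun : (fun (acc : List (List String)) mask =>
      if !mask.contains 1 || ((mask.sum : Int) > m) then acc
      else acc ++ [pvCompress xs mask]) =
      (fun acc mask =>
      if !(!mask.contains 1 || ((mask.sum : Int) > m)) then acc ++ [pvCompress xs mask]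
      else acc) := by
    funext acc mask
    cases hb : (!mask.contains 1 || decide ((mask.sum : Int) > m))
    · simp only [Bool.not_false, if_true, Bool.false_eq_true, if_false]
    · simp only [Bool.not_true, if_true, Bool.false_eq_true, if_false]
  rw [hfun, PySem.List.foldl_append_if, List.nil_append]
  rw [← map_compress_masks, List.filter_map]
  apply congrArg
  apply List.filter_congr
  intro mask hm
  simpa [Function.comp] using keep_eq xs m mask hm

-- ===== VERDICT (by name: the statement is the Claim_ definition above) =====
theorem get_clip_model_name_list_combination_spec : Claim_equal_get_clip_model_name_list_combination := by
  intro xs mc _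
  unfold Spec_get_clip_model_name_list_combination
  unfold get_clip_model_name_list_combination get_clip_model_name_list_combination_alt
  cases mc <;> exact main_eq xs _
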